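-- pv_equiv track=rewrite | github.com/ssvalerts2023-ops/infoflow-public-20260417 | src/infoflow_pipeline/download_documents.py | _looks_like_html_text
-- ===== SOURCE A (Python) =====
-- def _looks_like_html_text(text: str) -> bool:
--     """Cheap sanity check that decoded text resembles HTML markup."""
--     sample = (text or "").lstrip().lower()[:4096]
--     if not sample:
--         return False
--     html_markers = (
--         "<!doctype html",
--         "<html",
--         "<head",
--         "<body",
--         "<meta",
--         "<title",
--         "<script",
--         "<article",
--         "<div",
--     )
--     return any(marker in sample for marker in html_markers)
-- ===== SOURCE B (Python) =====
-- def _looks_like_html_text(text: str) -> bool: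
--     """Cheap sanity check that decoded text resembles HTML markup."""
--     sample = (text or "").lstrip().lower()[:4096]
--     tag_names = (
--         "!doctype html",
--         "html",
--         "head",
--         "body",
--         "meta",
--         "title",
--         "script",
--         "article",
--         "div",
--     )
--     # Single left-to-right pass: only at a '<' try the candidate tag names.
--     for i, ch in enumerate(sample):
--         if ch == "<" and any(sample.startswith(name, i + 1) for name in tag_names):
--             return True
--     return False
-- ===== Notes on version B (the rewrite author's own statement) =====
-- stated objective: alternative
-- what changed: Instead of testing each of the 9 markers for substring containment over the sample, B makes one left-to-right pass over the sample and, only at '<' characters, checks whether one of the tag names follows as a prefix.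
import Mathlib
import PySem

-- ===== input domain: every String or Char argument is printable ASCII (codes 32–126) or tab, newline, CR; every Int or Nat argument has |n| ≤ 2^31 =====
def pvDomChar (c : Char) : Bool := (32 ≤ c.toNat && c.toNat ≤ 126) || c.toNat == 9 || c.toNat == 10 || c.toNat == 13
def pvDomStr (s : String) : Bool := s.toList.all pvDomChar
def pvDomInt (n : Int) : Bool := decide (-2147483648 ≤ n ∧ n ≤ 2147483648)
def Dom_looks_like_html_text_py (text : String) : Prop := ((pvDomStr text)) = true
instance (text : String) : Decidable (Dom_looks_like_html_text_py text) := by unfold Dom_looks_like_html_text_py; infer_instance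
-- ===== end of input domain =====

-- B replaces the marker-by-marker substring loop with one left-to-right scan that tests
-- the candidate tag names only at '<' characters (objective: alternative; not claimed faster).


-- ===== PORT A =====
def htmlMarkers : List String :=
  ["<!doctype html", "<html", "<head", "<body", "<meta", "<title", "<script", "<article", "<div"]

def looks_like_html_text_py (text : String) : Bool :=
  -- sample = (text or "").lstrip().lower()[:4096]  ('text or ""' is 'text' for a string)
  let sample := PySem.Str.slice (PySem.Str.lower (PySem.Str.lstrip text)) none (some 4096)
  if PySem.Str.len sample = 0 then false
  else htmlMarkers.any (fun marker => PySem.Str.isIn marker sample)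

-- ===== PORT B =====
def altTagNames : List (List Char) :=
  ["!doctype html".toList, "html".toList, "head".toList, "body".toList, "meta".toList,
   "title".toList, "script".toList, "article".toList, "div".toList]

-- the 'for i, ch in enumerate(sample)' scan: at each position, if ch == '<', try the tag names
-- against the rest of the string (sample.startswith(name, i + 1) = name is a prefix of the rest)
def altScan : List Char → Bool
  | [] => false
  | c :: rest =>
      (c == '<' && altTagNames.any (fun name => PySem.Chars.startswith rest name)) || altScan rest

def looks_like_html_text_py_alt (text : String) : Bool :=
  let sample := PySem.Str.slice (PySem.Str.lower (PySem.Str.lstrip text)) none (some 4096)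
  altScan sample.toList

-- ===== PRECONDITION & SPEC =====
def Spec_looks_like_html_text_py (text : String) (out : Bool) : Prop := out = looks_like_html_text_py_alt text
instance (text : String) (out : Bool) : Decidable (Spec_looks_like_html_text_py text out) := by unfold Spec_looks_like_html_text_py; infer_instance

-- ===== CLAIM (what is proved, stated in full; the proofs are below) =====
def Claim_equal_looks_like_html_text_py : Prop := ∀ (text : String), Dom_looks_like_html_text_py text → Spec_looks_like_html_text_py text (looks_like_html_text_py text)

-- ===== LEMMAS AND PROOFS =====

-- the scan finds exactly the positions where some full marker '<' ++ name occurs as an infix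
lemma altScan_iff (cs : List Char) :
    altScan cs = true ↔ ∃ name ∈ altTagNames, ('<' :: name) <:+: cs := by
  induction cs with
  | nil =>
      simp [altScan]
  | cons c rest ih =>
      simp only [altScan, Bool.or_eq_true, Bool.and_eq_true, List.any_eq_true, beq_iff_eq, ih]
      constructor
      · rintro (⟨hc, name, hmem, hpre⟩ | ⟨name, hmem, hinf⟩)
        · subst hc
          exact ⟨name, hmem, List.infix_cons_iff.mpr
            (Or.inl (List.cons_prefix_cons.mpr ⟨rfl, (PySem.Chars.startswith_iff rest name).mp hpre⟩))⟩
        · exact ⟨name, hmem, (List.infix_cons_iff.mpr (Or.inr hinf))⟩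
      · rintro ⟨name, hmem, hinf⟩
        rcases List.infix_cons_iff.mp hinf with hpre | hinf'
        · rcases List.cons_prefix_cons.mp hpre with ⟨hc, hpre'⟩
          exact Or.inl ⟨hc.symm, name, hmem, (PySem.Chars.startswith_iff rest name).mpr hpre'⟩
        · exact Or.inr ⟨name, hmem, hinf'⟩

-- A's marker list is exactly '<' prepended to B's tag-name list
lemma markers_eq : htmlMarkers.map String.toList = altTagNames.map (fun n => '<' :: n) := by
  decide

lemma any_isIn_eq_altScan (s : String) :
    htmlMarkers.any (fun marker => PySem.Str.isIn marker s) = altScan s.toList := by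
  apply Bool.eq_iff_iff.mpr
  rw [altScan_iff]
  simp only [List.any_eq_true]
  constructor
  · rintro ⟨m, hm, hin⟩
    have hinf := (PySem.Str.isIn_iff_infix m s).mp hin
    have : m.toList ∈ altTagNames.map (fun n => '<' :: n) := by
      rw [← markers_eq]; exact List.mem_map_of_mem hm
    rcases List.mem_map.mp this with ⟨name, hname, heq⟩
    exact ⟨name, hname, heq ▸ hinf⟩
  · rintro ⟨name, hname, hinf⟩
    have : ('<' :: name) ∈ htmlMarkers.map String.toList := by
      rw [markers_eq]; exact List.mem_map_of_mem hname
    rcases List.mem_map.mp this with ⟨m, hm, heq⟩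
    exact ⟨m, hm, (PySem.Str.isIn_iff_infix m s).mpr (heq ▸ hinf)⟩

-- ===== VERDICT (by name: the statement is the Claim_ definition above) =====
theorem looks_like_html_text_py_spec : Claim_equal_looks_like_html_text_py := by
  intro text _
  unfold Spec_looks_like_html_text_py looks_like_html_text_py looks_like_html_text_py_alt
  set sample := PySem.Str.slice (PySem.Str.lower (PySem.Str.lstrip text)) none (some 4096) with hs
  by_cases h : PySem.Str.len sample = 0
  · -- empty sample: A returns False early, B's scan has nothing to scan
    have : sample.toList = [] := by
      have := PySem.Str.len_eq sample
      rw [this] at h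
      exact List.eq_nil_of_length_eq_zero (by exact_mod_cast h)
    rw [if_pos h]
    show false = altScan sample.toList
    rw [this]
    rfl
  · rw [if_neg h]
    show _ = altScan sample.toList
    rw [← any_isIn_eq_altScan]
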